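-- pv_equiv track=rewrite | github.com/WelderOliveira/T1-Seguranca-Comp | T2-Seguranca-Comp-main/main.py | incrementar
-- ===== SOURCE A (Python) =====
-- def incrementar(contador):
--     # Inicia a incrementação pelo último byte (menos significativo)
--     i = len(contador) - 1
--
--     while i >= 0:
--         # Incrementa o byte atual
--         contador[i] += 1
--
--         # Se houver um overflow (o byte se torna 0x100), continue incrementando o próximo byte
--         if contador[i] > 0xFF:
--             contador[i] = 0x00
--             i -= 1
--         else:
--             break
--
--     return contador
-- ===== SOURCE B (Python) =====
-- def incrementar(contador):
--     # Count how many trailing bytes will overflow (value >= 0xFF), then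
--     # zero them in one bulk write and bump the byte just before that suffix.
--     n = len(contador)
--     k = 0
--     for v in reversed(contador):
--         if v < 0xFF:
--             break
--         k += 1
--     contador[n - k:] = [0] * k
--     if k < n:
--         contador[n - k - 1] += 1
--     return contador
-- ===== Notes on version B (the rewrite author's own statement) =====
-- stated objective: alternative
-- what changed: Replaces the mutate-as-you-go per-byte carry loop by a pure scan that counts the trailing bytes that will overflow, then one bulk write of zeros plus a single increment of the preceding byte.
import Mathlib
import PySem

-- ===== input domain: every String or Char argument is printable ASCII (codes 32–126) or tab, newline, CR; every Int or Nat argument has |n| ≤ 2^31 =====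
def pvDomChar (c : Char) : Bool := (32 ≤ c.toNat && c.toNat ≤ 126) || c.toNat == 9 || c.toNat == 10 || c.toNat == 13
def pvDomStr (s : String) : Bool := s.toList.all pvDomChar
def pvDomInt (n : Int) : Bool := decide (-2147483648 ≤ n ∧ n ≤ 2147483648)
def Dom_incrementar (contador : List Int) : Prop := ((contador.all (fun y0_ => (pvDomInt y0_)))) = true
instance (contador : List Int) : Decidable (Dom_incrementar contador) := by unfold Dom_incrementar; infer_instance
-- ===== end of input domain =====

-- B replaces A's mutate-as-you-go carry loop by a pure scan counting the overflowing
-- suffix plus one bulk write (alternative decomposition; equivalence is about the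
-- return value — both Pythons mutate the argument in place the same way).

-- ===== PORT A =====
-- the while loop of A: i is the current index, always < c.length when called
def incrementarA_loop (c : List Int) (i : Nat) : List Int :=
  let v := c.getD i 0 + 1          -- contador[i] += 1
  let c' := c.set i v
  if v > 0xFF then
    let c'' := c'.set i 0          -- contador[i] = 0x00
    match i with
    | 0 => c''                     -- i -= 1 makes i < 0: loop ends
    | j + 1 => incrementarA_loop c'' j
  else c'                          -- break

def incrementar (contador : List Int) : List Int :=
  match contador.length with
  | 0 => contador                  -- i = -1: loop never runs
  | Nat.succ j => incrementarA_loop contador j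

-- ===== PORT B =====
-- the for-loop of B: counts leading elements ≥ 0xFF of the reversed list
def kcountB : List Int → Nat
  | [] => 0
  | v :: t => if v < 0xFF then 0 else kcountB t + 1

def incrementar_alt (contador : List Int) : List Int :=
  let n := contador.length
  let k := kcountB contador.reverse
  let c1 := contador.take (n - k) ++ List.replicate k 0   -- contador[n-k:] = [0]*k
  if k < n then c1.set (n - k - 1) (c1.getD (n - k - 1) 0 + 1) else c1

-- ===== PRECONDITION & SPEC =====
def Spec_incrementar (contador : List Int) (out : List Int) : Prop := out = incrementar_alt contador
instance (contador : List Int) (out : List Int) : Decidable (Spec_incrementar contador out) := by unfold Spec_incrementar; infer_instance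

-- ===== CLAIM (what is proved, stated in full; the proofs are below) =====
def Claim_equal_incrementar : Prop := ∀ (contador : List Int), Dom_incrementar contador → Spec_incrementar contador (incrementar contador)

-- ===== LEMMAS AND PROOFS =====

-- reverse-order reference form of the increment
def incRev : List Int → List Int
  | [] => []
  | v :: t => if v + 1 > 0xFF then 0 :: incRev t else (v + 1) :: t

def bump : List Int → List Int
  | [] => []
  | v :: t => (v + 1) :: t

theorem getD_len (t : List Int) (v : Int) (d : List Int) :
    (t ++ v :: d).getD t.length 0 = v := by
  induction t with
  | nil => simp
  | cons a t ih => simp [ih]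

theorem set_len (t : List Int) (v x : Int) (d : List Int) :
    (t ++ v :: d).set t.length x = t ++ x :: d := by
  induction t with
  | nil => simp
  | cons a t ih => simp [ih]

theorem kcountB_le (r : List Int) : kcountB r ≤ r.length := by
  induction r with
  | nil => simp [kcountB]
  | cons v t ih =>
    simp only [kcountB, List.length_cons]
    split <;> omega

theorem incRev_eq (r : List Int) :
    incRev r = List.replicate (kcountB r) 0 ++ bump (r.drop (kcountB r)) := by
  induction r with
  | nil => simp [incRev, kcountB, bump]
  | cons v t ih =>
    by_cases h : v < 0xFF
    · have h' : ¬ (v + 1 > 0xFF) := by omega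
      simp [incRev, kcountB, h, h', bump]
    · have h' : v + 1 > 0xFF := by omega
      simp [incRev, kcountB, h, h', ih, List.replicate_succ]

theorem loopA_eq (i : Nat) : ∀ (t : List Int) (v : Int) (d : List Int), t.length = i →
    incrementarA_loop (t ++ v :: d) i = (incRev ((t ++ [v]).reverse)).reverse ++ d := by
  induction i with
  | zero =>
    intro t v d ht
    have : t = [] := List.eq_nil_of_length_eq_zero ht
    subst this
    by_cases h : v + 1 > 0xFF <;>
      simp [incrementarA_loop, incRev, h]
  | succ j ih =>
    intro t v d ht
    rcases (List.eq_nil_or_concat t) with h | ⟨t', w, rfl⟩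
    · subst h; simp at ht
    have hcw : t'.concat w = t' ++ [w] := by simp
    rw [hcw] at ht ⊢
    have ht' : t'.length = j := by simpa using ht
    by_cases h : v + 1 > 0xFF
    · rw [incrementarA_loop]
      simp only [← ht, getD_len, set_len, if_pos h]
      rw [List.append_assoc, List.singleton_append, ih t' w (0 :: d) ht']
      simp [incRev, h]
    · rw [incrementarA_loop]
      simp only [← ht, getD_len, set_len, if_neg h]
      simp [incRev, h]

theorem lemA (c : List Int) : incrementar c = (incRev c.reverse).reverse := by
  rcases (List.eq_nil_or_concat c) with h | ⟨t, v, rfl⟩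
  · subst h; simp [incrementar, incRev]
  have hcw : t.concat v = t ++ [v] := by simp
  rw [hcw]
  have hl : (t ++ [v]).length = t.length + 1 := by simp
  rw [incrementar]
  simp only [hl]
  have := loopA_eq t.length t v [] rfl
  rw [show t ++ [v] = t ++ v :: ([] : List Int) by simp] at this ⊢
  rw [this]
  simp

theorem lemB (c : List Int) : incrementar_alt c = (incRev c.reverse).reverse := by
  rw [incrementar_alt]
  have hk := kcountB_le c.reverse
  simp only [List.length_reverse] at hk
  set n := c.length with hn
  set k := kcountB c.reverse with hkdef
  have hdecomp : c.reverse.take k ++ c.reverse.drop k = c.reverse := List.take_append_drop _ _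
  rw [incRev_eq c.reverse, ← hkdef]
  by_cases h : k < n
  · have hdlen : (c.reverse.drop k).length = n - k := by
      simp only [List.length_drop, List.length_reverse]
      omega
    obtain ⟨v, t, hvt⟩ : ∃ v t, c.reverse.drop k = v :: t := by
      cases hd : c.reverse.drop k with
      | nil => rw [hd] at hdlen; simp at hdlen; omega
      | cons v t => exact ⟨v, t, rfl⟩
    have htlen : t.length = n - k - 1 := by
      rw [hvt] at hdlen; simp at hdlen; omega
    have hc : c = t.reverse ++ [v] ++ (c.reverse.take k).reverse := by
      have h2 := congrArg List.reverse hdecomp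
      simp [hvt] at h2
      simpa [List.append_assoc] using h2.symm
    have htake : c.take (n - k) = t.reverse ++ [v] := by
      conv_lhs => rw [hc]
      rw [List.take_append_of_le_length (by simp [htlen]; omega)]
      apply List.take_of_length_le
      simp [htlen]
      omega
    rw [if_pos h, htake, hvt]
    have hlen2 : t.reverse.length = n - k - 1 := by simp [htlen]
    have e1 : (t.reverse ++ [v]) ++ List.replicate k 0 = t.reverse ++ v :: List.replicate k 0 := by
      simp
    rw [e1, ← hlen2, getD_len, set_len]
    simp [bump]
  · have hkn : k = n := by omega
    have hd : c.reverse.drop k = [] := by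
      apply List.drop_eq_nil_of_le; simp [hkn]; omega
    rw [if_neg h, hd, hkn]
    simp [bump]

theorem incrementar_spec : Claim_equal_incrementar := by
  intro c _
  unfold Spec_incrementar
  rw [lemA, lemB]
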